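-- pv_equiv track=rewrite | github.com/eliottcassidy2000/math | 04-computation/paley_chi_transitive.py | paley_tournament
-- ===== SOURCE A (Python) =====
-- def paley_tournament(p):
--     """Return adjacency: adj[v] = set of vertices v beats.
--     Only valid for p ≡ 3 mod 4."""
--     assert p % 4 == 3, f"Paley tournament only exists for p ≡ 3 (mod 4), got p={p}"
--     qr = set()
--     for x in range(1, p):
--         qr.add((x * x) % p)
--     adj = [set() for _ in range(p)]
--     for a in range(p):
--         for b in range(p):
--             if a != b and (b - a) % p in qr:
--                 adj[a].add(b)
--     return adj, qr
-- ===== SOURCE B (Python) =====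
-- def paley_tournament(p):
--     """Return adjacency: adj[v] = set of vertices v beats.
--     Only valid for p ≡ 3 mod 4."""
--     assert p % 4 == 3, f"Paley tournament only exists for p ≡ 3 (mod 4), got p={p}"
--     qr = set()
--     for x in range(1, p):
--         qr.add((x * x) % p)
--     # direct edge generation: each vertex's out-neighbours are its sorted
--     # nonzero residue offsets, split at the wrap-around point p - a
--     S = sorted(r for r in qr if r != 0)
--     adj = [set([a + r - p for r in S if r >= p - a]
--                + [a + r for r in S if r < p - a])
--            for a in range(p)]
--     return adj, qr
-- ===== Notes on version B (the rewrite author's own statement) =====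
-- stated objective: alternative
-- what changed: Instead of scanning all p*p ordered pairs and testing (b-a)%p for set membership, B sorts the nonzero residue offsets once and generates each vertex's out-neighbour row directly by splitting the sorted offset list at the wrap-around point p-a (b = a+r or a+r-p), so the per-pair membership test disappears.
import Mathlib
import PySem

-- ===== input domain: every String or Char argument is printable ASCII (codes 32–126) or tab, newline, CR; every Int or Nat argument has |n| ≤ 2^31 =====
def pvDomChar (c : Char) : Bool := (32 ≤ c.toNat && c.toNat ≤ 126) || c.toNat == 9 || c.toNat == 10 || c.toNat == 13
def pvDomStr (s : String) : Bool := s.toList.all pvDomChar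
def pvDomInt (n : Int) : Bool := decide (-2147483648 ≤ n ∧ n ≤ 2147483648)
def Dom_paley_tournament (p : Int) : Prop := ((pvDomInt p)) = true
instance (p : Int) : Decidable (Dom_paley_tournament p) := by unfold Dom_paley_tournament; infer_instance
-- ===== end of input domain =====

-- B sorts the nonzero residue offsets once and generates each vertex's out-neighbour row
-- directly by splitting the sorted offset list at the wrap-around point p - a, instead of
-- A's full p×p scan with a per-pair membership test. Same value everywhere A returns.

-- ===== PORT A =====
-- adj[a].add(b): a is drawn from range(p), hence a nonnegative in-range index,
-- so List.modify a.toNat is exact for Python's adj[a].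
def paley_tournament (p : Int) : List (List Int) × List Int :=
  let qr : PySem.Set Int :=
    (PySem.List.pyRange 1 p 1).foldl
      (fun s x => PySem.Set.add s (PySem.Int.mod (x * x) p)) PySem.Set.empty
  let adj0 : List (PySem.Set Int) :=
    (PySem.List.pyRange 0 p 1).map (fun _ => PySem.Set.empty)
  let adj :=
    (PySem.List.pyRange 0 p 1).foldl (fun adj a =>
      (PySem.List.pyRange 0 p 1).foldl (fun adj b =>
        if a ≠ b ∧ PySem.Int.mod (b - a) p ∈ qr then
          adj.modify a.toNat (fun s => PySem.Set.add s b)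
        else adj) adj) adj0
  (adj, qr)

-- ===== PORT B =====
def paley_tournament_alt (p : Int) : List (List Int) × List Int :=
  let qr : PySem.Set Int :=
    (PySem.List.pyRange 1 p 1).foldl
      (fun s x => PySem.Set.add s (PySem.Int.mod (x * x) p)) PySem.Set.empty
  let S : List Int := PySem.List.sorted (qr.filter (fun r => decide (r ≠ 0))) (fun r => r) false
  let adj : List (PySem.Set Int) :=
    (PySem.List.pyRange 0 p 1).map (fun a =>
      PySem.Set.ofList
        (((S.filter (fun r => decide (p - a ≤ r))).map (fun r => a + r - p)) ++
         ((S.filter (fun r => decide (r < p - a))).map (fun r => a + r))))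
  (adj, qr)

-- ===== PRECONDITION & SPEC =====
-- Python A asserts p % 4 == 3 (AssertionError otherwise); Pre_ is exactly that.
def Pre_paley_tournament (p : Int) : Prop := PySem.Int.mod p 4 = 3
instance (p : Int) : Decidable (Pre_paley_tournament p) := by unfold Pre_paley_tournament; infer_instance
def pvWitness_paley_tournament : Int := (7)

def Spec_paley_tournament (p : Int) (out : List (List Int) × List Int) : Prop := out = paley_tournament_alt p
instance (p : Int) (out : List (List Int) × List Int) : Decidable (Spec_paley_tournament p out) := by unfold Spec_paley_tournament; infer_instance

-- ===== CLAIM (what is proved, stated in full; the proofs are below) =====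
def Claim_equal_paley_tournament : Prop := ∀ (p : Int), Dom_paley_tournament p → Pre_paley_tournament p → Spec_paley_tournament p (paley_tournament p)

-- ===== LEMMAS AND PROOFS =====

-- proof-side names for shared values of the ports
def pvQr (p : Int) : PySem.Set Int :=
  (PySem.List.pyRange 1 p 1).foldl
    (fun s x => PySem.Set.add s (PySem.Int.mod (x * x) p)) PySem.Set.empty

def pvS (p : Int) : List Int :=
  PySem.List.sorted ((pvQr p).filter (fun r => decide (r ≠ 0))) (fun r => r) false

-- the adjacency row of vertex v, in ascending order (what A's inner scan produces)
def pvRow (p : Int) (qr : List Int) (v : Int) : List Int :=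
  (PySem.List.pyRange 0 p 1).filter (fun b => decide (v ≠ b ∧ PySem.Int.mod (b - v) p ∈ qr))

theorem pvModifyModify {α : Type} (l : List α) (i : Nat) (f g : α → α) :
    (l.modify i f).modify i g = l.modify i (fun x => g (f x)) := by
  apply List.ext_getElem?
  intro j
  simp only [List.getElem?_modify]
  cases l[j]?
  · rfl
  · by_cases h : i = j <;> simp [h]

theorem pvFoldCondModify {α : Type} (l : List Int) (i : Nat) (c : Int → Prop) [DecidablePred c]
    (g : Int → α → α) (A : List α) :
    l.foldl (fun A b => if c b then A.modify i (g b) else A) A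
      = A.modify i (fun s => l.foldl (fun s b => if c b then g b s else s) s) := by
  induction l generalizing A with
  | nil => exact (List.modify_id i A).symm
  | cons b l ih =>
    simp only [List.foldl_cons]
    by_cases hb : c b
    · rw [if_pos hb, ih, pvModifyModify]
      simp [hb]
    · rw [if_neg hb, ih]
      simp [hb]

theorem pvFoldModifyDistinct {α : Type} (l : List Int) (F : Int → α → α) (A : List α)
    (hnn : ∀ a ∈ l, 0 ≤ a) (hnd : l.Nodup) (v : Nat) :
    (l.foldl (fun A a => A.modify a.toNat (F a)) A)[v]? =
      if (v : Int) ∈ l then A[v]?.map (F (v : Int)) else A[v]? := by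
  induction l generalizing A with
  | nil => simp
  | cons a l ih =>
    have ha0 : 0 ≤ a := hnn a (List.mem_cons_self ..)
    simp only [List.foldl_cons]
    rw [ih _ (fun x hx => hnn x (List.mem_cons_of_mem _ hx)) hnd.of_cons]
    by_cases hv : (v : Int) ∈ l
    · rw [if_pos hv, if_pos (List.mem_cons_of_mem _ hv)]
      have hne : a.toNat ≠ v := by
        have : a ≠ (v : Int) := fun h => (List.nodup_cons.1 hnd).1 (h ▸ hv)
        omega
      simp [hne]
    · rw [if_neg hv]
      by_cases hva : (v : Int) = a
      · have hnat : a.toNat = v := by omega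
        rw [if_pos (by simp [List.mem_cons, hva])]
        cases hA : A[v]? <;> simp [hA, hnat, hva]
      · have hne : a.toNat ≠ v := by omega
        rw [if_neg (by simp [List.mem_cons]; exact ⟨hva, hv⟩)]
        simp [hne]

theorem pvCondFoldAdd (l : List Int) (c : Int → Prop) [DecidablePred c] (s : PySem.Set Int) :
    l.foldl (fun s b => if c b then PySem.Set.add s b else s) s
      = PySem.Set.update s (l.filter (fun b => decide (c b))) := by
  simp only [PySem.Set.update, List.foldl_filter]
  exact PySem.List.foldl_congr_mem _ _ _ _ (fun acc x _ => by by_cases h : c x <;> simp [h])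

theorem pvModPos {p d : Int} (h0 : 0 ≤ d) (h1 : d < p) : PySem.Int.mod d p = d := by
  rw [PySem.Int.mod_eq_emod_of_pos (by omega)]
  exact Int.emod_eq_of_lt h0 h1

theorem pvModNeg {p e : Int} (h0 : -p < e) (h1 : e < 0) : PySem.Int.mod e p = e + p := by
  rw [PySem.Int.mod_eq_emod_of_pos (by omega)]
  have : e % p = (e + p) % p := by
    conv_lhs => rw [show e = (e + p) - p by ring]
    exact (Int.sub_emod_right _ _)
  rw [this]
  exact Int.emod_eq_of_lt (by omega) (by omega)

theorem pvAchar (p : Int) :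
    paley_tournament p
      = ((PySem.List.pyRange 0 p 1).map (fun v => pvRow p (pvQr p) v), pvQr p) := by
  show ((PySem.List.pyRange 0 p 1).foldl (fun adj a =>
      (PySem.List.pyRange 0 p 1).foldl (fun adj b =>
        if a ≠ b ∧ PySem.Int.mod (b - a) p ∈ pvQr p then
          adj.modify a.toNat (fun s => PySem.Set.add s b)
        else adj) adj)
      ((PySem.List.pyRange 0 p 1).map (fun _ => PySem.Set.empty)),
    pvQr p) = _
  simp only [Prod.mk.injEq]
  refine ⟨?_, trivial⟩
  rw [PySem.List.foldl_congr_mem _ _ (fun adj a => adj.modify a.toNat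
        (fun s => PySem.Set.update s ((PySem.List.pyRange 0 p 1).filter
          (fun b => decide (a ≠ b ∧ PySem.Int.mod (b - a) p ∈ pvQr p))))) _
      (fun acc a _ => by
        rw [pvFoldCondModify _ _ (fun b => a ≠ b ∧ PySem.Int.mod (b - a) p ∈ pvQr p)
          (fun b s => PySem.Set.add s b)]
        simp only [pvCondFoldAdd])]
  apply List.ext_getElem?
  intro v
  rw [pvFoldModifyDistinct _ _ _ (fun a ha => (PySem.List.mem_pyRange_one.1 ha).1)
    (PySem.List.nodup_pyRange_one 0 p)]
  by_cases hv : (v : Int) ∈ PySem.List.pyRange 0 p 1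
  · have hvp : (v : Int) < p := (PySem.List.mem_pyRange_one.1 hv).2
    have hlen : v < (PySem.List.pyRange 0 p 1).length := by
      rw [PySem.List.length_pyRange_one]; omega
    simp only [List.getElem?_map, List.getElem?_eq_getElem hlen,
      PySem.List.getElem_pyRange_one, Option.map_some, zero_add]
    rw [if_pos hv]
    rw [show (PySem.Set.empty : PySem.Set Int) = ([] : List Int) from rfl,
      PySem.Set.update_nil_left, PySem.Set.ofList_eq_self_of_nodup _
      ((PySem.List.nodup_pyRange_one 0 p).filter _)]
    rfl
  · have hge : (PySem.List.pyRange 0 p 1).length ≤ v := by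
      rw [PySem.List.length_pyRange_one]
      rcases Nat.lt_or_ge v (p - 0).toNat with h | h
      · exact absurd (PySem.List.mem_pyRange_one.2 (by omega)) hv
      · exact h
    have hnp : ¬ ((v : Int) < p) := by
      rw [PySem.List.length_pyRange_one] at hge; omega
    rw [if_neg hv]
    simp [hnp]

-- qr as an ofList, for nodup / membership facts
theorem pvQr_eq_ofList (p : Int) :
    pvQr p = PySem.Set.ofList
      ((PySem.List.pyRange 1 p 1).map (fun x => PySem.Int.mod (x * x) p)) := by
  rw [show (PySem.Set.ofList ((PySem.List.pyRange 1 p 1).map (fun x => PySem.Int.mod (x * x) p)))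
        = PySem.Set.update PySem.Set.empty ((PySem.List.pyRange 1 p 1).map (fun x => PySem.Int.mod (x * x) p))
      from (PySem.Set.update_nil_left _).symm,
    PySem.Set.update_map_eq_foldl_add]
  rfl

theorem pvQr_nodup (p : Int) : (pvQr p).Nodup := by
  rw [pvQr_eq_ofList]; exact PySem.Set.nodup_ofList _

theorem pvQr_bounds (p : Int) {r : Int} (hr : r ∈ pvQr p) : 0 ≤ r ∧ r < p := by
  rw [pvQr_eq_ofList, PySem.Set.mem_ofList, List.mem_map] at hr
  obtain ⟨x, hx, rfl⟩ := hr
  have hx' := PySem.List.mem_pyRange_one.1 hx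
  have hp : 0 < p := by omega
  rw [PySem.Int.mod_eq_emod_of_pos hp]
  exact ⟨Int.emod_nonneg _ (by omega), Int.emod_lt_of_pos _ hp⟩

theorem pvS_mem (p : Int) {r : Int} : r ∈ pvS p ↔ r ∈ pvQr p ∧ r ≠ 0 := by
  unfold pvS
  rw [PySem.List.mem_sorted, List.mem_filter]
  simp

theorem pvS_pairwise (p : Int) : (pvS p).Pairwise (· < ·) := by
  have hnd : (pvS p).Nodup :=
    (PySem.List.sorted_perm _ _ _).nodup_iff.2 ((pvQr_nodup p).filter _)
  have hle : (pvS p).Pairwise (fun a b => a ≤ b) := PySem.List.sorted_pairwise _ _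
  have := hle.and (List.nodup_iff_pairwise_ne.1 hnd)
  exact this.imp (fun h => lt_of_le_of_ne h.1 h.2)

-- the B row at vertex v equals A's ascending row
theorem pvRowB (p : Int) (v : Int) (hv0 : 0 ≤ v) (hvp : v < p) :
    PySem.Set.ofList
        ((((pvS p).filter (fun r => decide (p - v ≤ r))).map (fun r => v + r - p)) ++
         (((pvS p).filter (fun r => decide (r < p - v))).map (fun r => v + r)))
      = pvRow p (pvQr p) v := by
  set lo := (((pvS p).filter (fun r => decide (p - v ≤ r))).map (fun r => v + r - p)) with hlo
  set hi := (((pvS p).filter (fun r => decide (r < p - v))).map (fun r => v + r)) with hhi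
  have hSpw := pvS_pairwise p
  have hlopw : lo.Pairwise (· < ·) := by
    rw [hlo]
    exact ((hSpw.filter _).map _ (fun a b h => by omega))
  have hhipw : hi.Pairwise (· < ·) := by
    rw [hhi]
    exact ((hSpw.filter _).map _ (fun a b h => by omega))
  have hlomem : ∀ b ∈ lo, 0 ≤ b ∧ b < v ∧ PySem.Int.mod (b - v) p ∈ pvQr p := by
    intro b hb
    rw [hlo, List.mem_map] at hb
    obtain ⟨r, hr, rfl⟩ := hb
    rw [List.mem_filter] at hr
    obtain ⟨hrS, hcond⟩ := hr
    have hcond' : p - v ≤ r := by simpa using hcond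
    obtain ⟨hrq, hr0⟩ := (pvS_mem p).1 hrS
    have hb := pvQr_bounds p hrq
    refine ⟨by omega, by omega, ?_⟩
    have : PySem.Int.mod (v + r - p - v) p = r := by
      rw [show v + r - p - v = r - p by ring, pvModNeg (by omega) (by omega)]; ring
    rw [this]; exact hrq
  have hhimem : ∀ b ∈ hi, v < b ∧ b < p ∧ PySem.Int.mod (b - v) p ∈ pvQr p := by
    intro b hb
    rw [hhi, List.mem_map] at hb
    obtain ⟨r, hr, rfl⟩ := hb
    rw [List.mem_filter] at hr
    obtain ⟨hrS, hcond⟩ := hr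
    have hcond' : r < p - v := by simpa using hcond
    obtain ⟨hrq, hr0⟩ := (pvS_mem p).1 hrS
    have hb := pvQr_bounds p hrq
    refine ⟨by omega, by omega, ?_⟩
    have : PySem.Int.mod (v + r - v) p = r := by
      rw [show v + r - v = r by ring, pvModPos (by omega) (by omega)]
    rw [this]; exact hrq
  have hpw : (lo ++ hi).Pairwise (· < ·) := by
    rw [List.pairwise_append]
    exact ⟨hlopw, hhipw, fun a ha b hb =>
      lt_trans (hlomem a ha).2.1 (hhimem b hb).1⟩
  have hmemiff : ∀ b, b ∈ lo ++ hi ↔ b ∈ pvRow p (pvQr p) v := by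
    intro b
    unfold pvRow
    rw [List.mem_append, List.mem_filter, PySem.List.mem_pyRange_one]
    constructor
    · rintro (hb | hb)
      · obtain ⟨h0, hlt, hq⟩ := hlomem b hb
        exact ⟨⟨h0, by omega⟩, by simp [hq]; omega⟩
      · obtain ⟨hgt, hlt, hq⟩ := hhimem b hb
        exact ⟨⟨by omega, hlt⟩, by simp [hq]; omega⟩
    · rintro ⟨⟨h0, hlt⟩, hcond⟩
      have hcond' : v ≠ b ∧ PySem.Int.mod (b - v) p ∈ pvQr p := by simpa using hcond
      obtain ⟨hne, hq⟩ := hcond'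
      rcases lt_or_gt_of_ne (Ne.symm hne) with hbv | hbv
      · left
        rw [hlo, List.mem_map]
        refine ⟨b - v + p, ?_, by ring⟩
        rw [List.mem_filter]
        have hm : PySem.Int.mod (b - v) p = b - v + p := pvModNeg (by omega) (by omega)
        rw [hm] at hq
        refine ⟨(pvS_mem p).2 ⟨hq, by omega⟩, by simp; omega⟩
      · right
        rw [hhi, List.mem_map]
        refine ⟨b - v, ?_, by ring⟩
        rw [List.mem_filter]
        have hm : PySem.Int.mod (b - v) p = b - v := pvModPos (by omega) (by omega)
        rw [hm] at hq
        refine ⟨(pvS_mem p).2 ⟨hq, by omega⟩, by simp; omega⟩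
  have hrowpw : (pvRow p (pvQr p) v).Pairwise (· < ·) :=
    (PySem.List.pairwise_lt_pyRange_one 0 p).filter _
  have hperm : (lo ++ hi).Perm (pvRow p (pvQr p) v) :=
    (List.perm_ext_iff_of_nodup hpw.nodup hrowpw.nodup).2 hmemiff
  rw [PySem.Set.ofList_eq_self_of_nodup _ hpw.nodup]
  exact hperm.eq_of_pairwise (fun a b _ _ h1 h2 => absurd h2 (not_lt.2 h1.le)) hpw hrowpw

theorem pvBchar (p : Int) :
    paley_tournament_alt p
      = ((PySem.List.pyRange 0 p 1).map (fun v => pvRow p (pvQr p) v), pvQr p) := by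
  show ((PySem.List.pyRange 0 p 1).map (fun a =>
      PySem.Set.ofList
        ((((pvS p).filter (fun r => decide (p - a ≤ r))).map (fun r => a + r - p)) ++
         (((pvS p).filter (fun r => decide (r < p - a))).map (fun r => a + r)))),
    pvQr p) = _
  simp only [Prod.mk.injEq]
  refine ⟨?_, trivial⟩
  apply List.map_congr_left
  intro a ha
  have h := PySem.List.mem_pyRange_one.1 ha
  exact pvRowB p a h.1 h.2

-- ===== VERDICT (by name: the statement is the Claim_ definition above) =====
theorem paley_tournament_spec : Claim_equal_paley_tournament := by
  intro p _ _
  show paley_tournament p = paley_tournament_alt p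
  rw [pvAchar, pvBchar]
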